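-- pv_equiv track=rewrite | github.com/pkwagner/advent-of-code-2020 | 7_HandyHaversacks/part1.py | outer_colors
-- ===== SOURCE A (Python) =====
-- def outer_colors(rules, color):
--   queue = set(rules[color])
--   colors = set(rules[color])
--
--   while len(queue) > 0:
--     succ = queue.pop()
--     if succ in rules:
--       queue |= rules[succ] - colors
--       colors |= rules[succ]
--
--   return colors
-- ===== SOURCE B (Python) =====
-- def outer_colors(rules, color):
--   # Round-based fixpoint: repeatedly sweep ALL collected colors, appending unseen
--   # successors to an ordered list, until a full sweep adds nothing new.
--   reached = []
--   for c in rules[color]: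
--     if c not in reached:
--       reached.append(c)
--   while True:
--     added = False
--     for c in list(reached):
--       if c in rules:
--         for child in rules[c]:
--           if child not in reached:
--             reached.append(child)
--             added = True
--     if not added:
--       return set(reached)
-- ===== Notes on version B (the rewrite author's own statement) =====
-- stated objective: alternative
-- what changed: Replaces A's set-based worklist (pop one pending color, union in its unseen successors) by a round-based fixpoint over a plain ordered list: repeatedly sweep every collected color, appending unseen successors, until a full sweep adds nothing.
import Mathlib
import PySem

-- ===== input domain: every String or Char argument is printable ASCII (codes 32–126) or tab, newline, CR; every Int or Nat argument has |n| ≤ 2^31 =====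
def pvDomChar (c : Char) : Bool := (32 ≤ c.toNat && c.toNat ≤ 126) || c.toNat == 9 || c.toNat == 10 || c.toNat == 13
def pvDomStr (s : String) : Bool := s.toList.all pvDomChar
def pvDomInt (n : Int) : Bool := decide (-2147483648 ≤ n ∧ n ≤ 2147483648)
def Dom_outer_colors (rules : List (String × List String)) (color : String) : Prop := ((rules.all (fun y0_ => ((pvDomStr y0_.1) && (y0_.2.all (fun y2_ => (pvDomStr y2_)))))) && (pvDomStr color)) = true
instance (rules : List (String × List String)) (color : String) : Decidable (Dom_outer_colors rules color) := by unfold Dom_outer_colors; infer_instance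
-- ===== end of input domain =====

-- B replaces A's set-based worklist (pop one pending color, union in its unseen successors)
-- by a round-based fixpoint over a plain ordered list: sweep every collected color,
-- appending unseen successors, until a sweep adds nothing. Alternative, not claimed faster.
-- Return sets are equal (proved as lists here).

-- ===== PORT A =====
-- all strings occurring in rule values; used only by the termination measure of A's loop
def pvUniv (rules : List (String × List String)) : List String :=
  rules.flatMap (fun p => p.2)

-- number of universe elements not yet collected (strictly drops when a new color is found)
def pvGap (rules : List (String × List String)) (colors : List String) : Nat :=
  ((pvUniv rules).filter (fun x => !colors.contains x)).length

-- next four lemmas exist only for the A port's decreasing_by proof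
theorem pvFilter_length_lt {α : Type} {l : List α} {q : α → Bool} {x : α}
    (hx : x ∈ l) (hqx : q x = false) : (l.filter q).length < l.length := by
  induction l with
  | nil => cases hx
  | cons a l ih =>
    rcases List.mem_cons.mp hx with rfl | hmem
    · rw [List.filter_cons, hqx]
      exact Nat.lt_succ_of_le (List.length_filter_le _ _)
    · rw [List.filter_cons]
      by_cases hqa : q a = true
      · simp only [hqa, List.length_cons]
        exact Nat.succ_lt_succ (ih hmem)
      · simp only [if_neg hqa]
        exact Nat.lt_succ_of_lt (ih hmem)

theorem pvGap_lt {rules : List (String × List String)} {colors colors' : List String} {x : String}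
    (hx : x ∈ pvUniv rules) (hxc : x ∉ colors) (hsub : ∀ y ∈ colors, y ∈ colors') (hx' : x ∈ colors') :
    pvGap rules colors' < pvGap rules colors := by
  unfold pvGap
  have key : ((pvUniv rules).filter (fun y => !colors'.contains y))
      = (((pvUniv rules).filter (fun y => !colors.contains y)).filter (fun y => !colors'.contains y)) := by
    rw [List.filter_filter]
    apply List.filter_congr
    intro y _
    by_cases h' : y ∈ colors'
    · simp [h']
    · have hyc : y ∉ colors := fun hc => h' (hsub y hc)
      simp [h', hyc]
  rw [key]
  apply pvFilter_length_lt (x := x)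
  · simp [List.mem_filter, hx, hxc]
  · simp [hx']

theorem mem_pvUniv_of_get? {rules : List (String × List String)} {c : String} {v : List String} {x : String}
    (h : PySem.Dict.get? (PySem.Dict.mk rules) c = some v) (hx : x ∈ v) : x ∈ pvUniv rules := by
  unfold PySem.Dict.get? at h
  cases hf : List.find? (fun p => p.1 == c) (PySem.Dict.items (PySem.Dict.mk rules)) with
  | none => simp [hf] at h
  | some p =>
    simp only [hf, Option.map_some, Option.some.injEq] at h
    have hp : p ∈ rules := List.mem_of_find?_eq_some hf
    exact List.mem_flatMap.mpr ⟨p, hp, h ▸ hx⟩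

theorem mem_pvUniv_of_getD {rules : List (String × List String)} {c : String} {x : String}
    (hx : x ∈ PySem.Dict.getD (PySem.Dict.mk rules) c []) : x ∈ pvUniv rules := by
  unfold PySem.Dict.getD at hx
  cases hg : PySem.Dict.get? (PySem.Dict.mk rules) c with
  | none => simp [hg] at hx
  | some v => exact mem_pvUniv_of_get? hg (by simpa [hg] using hx)

-- A's while-loop: pop a color from the queue, add its rule's unseen successors.
-- (Python pops a set in unspecified hash order; the port pops the first element —
-- the returned SET does not depend on that order.)
def aLoop (rules : List (String × List String)) (queue colors : PySem.Set String) : PySem.Set String :=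
  match queue with
  | [] => colors
  | succ :: rest =>
    if PySem.Dict.contains (PySem.Dict.mk rules) succ then
      aLoop rules
        (PySem.Set.union rest
          (PySem.Set.diff (PySem.Set.ofList (PySem.Dict.getD (PySem.Dict.mk rules) succ [])) colors))
        (PySem.Set.union colors (PySem.Dict.getD (PySem.Dict.mk rules) succ []))
    else aLoop rules rest colors
termination_by (pvGap rules colors, queue.length)
decreasing_by
  · by_cases hd : PySem.Set.diff (PySem.Set.ofList (PySem.Dict.getD (PySem.Dict.mk rules) succ [])) colors = []
    · have h1 : PySem.Set.union colors (PySem.Dict.getD (PySem.Dict.mk rules) succ []) = colors := by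
        show PySem.Set.update colors _ = colors
        rw [PySem.Set.update_eq_append_filter]
        have he : (PySem.Set.ofList (PySem.Dict.getD (PySem.Dict.mk rules) succ [])).filter
            (fun y => !(PySem.Set.contains colors y)) = [] := hd
        rw [he, List.append_nil]
      have h2 : PySem.Set.union rest
          (PySem.Set.diff (PySem.Set.ofList (PySem.Dict.getD (PySem.Dict.mk rules) succ [])) colors) = rest := by
        rw [hd]; rfl
      rw [h1, h2]
      exact Prod.Lex.right _ (Nat.lt_succ_self _)
    · obtain ⟨x, hx⟩ := List.exists_mem_of_ne_nil _ hd
      have hx' := List.mem_filter.mp hx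
      have hxn : x ∈ PySem.Dict.getD (PySem.Dict.mk rules) succ [] := (PySem.Set.mem_ofList _ _).mp hx'.1
      have hxc : x ∉ colors := by
        intro hc
        simp [hc] at hx'
      apply Prod.Lex.left
      exact pvGap_lt (mem_pvUniv_of_getD hxn) hxc
        (fun y hy => (PySem.Set.mem_union _ _ _).mpr (Or.inl hy))
        ((PySem.Set.mem_union _ _ _).mpr (Or.inr hxn))
  · exact Prod.Lex.right _ (Nat.lt_succ_self _)

def outer_colors (rules : List (String × List String)) (color : String) : List String :=
  match PySem.Dict.get? (PySem.Dict.mk rules) color with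
  | some init => aLoop rules (PySem.Set.ofList init) (PySem.Set.ofList init)
  | none => []   -- Python raises KeyError here; excluded by Pre_outer_colors

-- ===== PORT B =====
-- one sweep: for c in list(reached): if c in rules: for child in rules[c]:
--              if child not in reached: reached.append(child); added = True
def bSweep (rules : List (String × List String)) (snapshot : List String)
    (st : List String × Bool) : List String × Bool :=
  snapshot.foldl
    (fun st c =>
      if PySem.Dict.contains (PySem.Dict.mk rules) c then
        (PySem.Dict.getD (PySem.Dict.mk rules) c []).foldl
          (fun st child => if st.1.contains child then st else (st.1 ++ [child], true)) st
      else st)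
    st

-- value of one sweep's reached-list, used by the termination argument below
def bRound (rules : List (String × List String)) (snapshot reached : List String) : List String :=
  snapshot.foldl
    (fun acc c => PySem.Set.update acc (PySem.Dict.getD (PySem.Dict.mk rules) c [])) reached

-- number of successor occurrences (with multiplicity) not yet reached: B's termination measure
def bPending (rules : List (String × List String)) (reached : List String) : Nat :=
  (rules.flatMap Prod.snd).countP (fun s => !reached.contains s)

-- the next five lemmas exist only for the B port's decreasing_by proof
theorem bInner_eq (cs : List String) : ∀ (r : List String) (a : Bool),
    cs.foldl (fun st child => if st.1.contains child then st else (st.1 ++ [child], true)) (r, a)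
      = (PySem.Set.update r cs, a || decide (PySem.Set.update r cs ≠ r)) := by
  induction cs with
  | nil => intro r a; simp [PySem.Set.update]
  | cons c cs ih =>
    intro r a
    by_cases hc : r.contains c = true
    · have hmem : c ∈ r := by simpa using hc
      have hadd : PySem.Set.add r c = r := by
        simp [PySem.Set.add, PySem.Set.contains, hmem]
      have hupd : PySem.Set.update r (c :: cs) = PySem.Set.update r cs := by
        show PySem.Set.update (PySem.Set.add r c) cs = _
        rw [hadd]
      simp only [List.foldl_cons, hc, if_true, ih, hupd]
    · have hcf : r.contains c = false := eq_false_of_ne_true hc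
      have hmem : c ∉ r := by simpa using hcf
      have hadd : PySem.Set.add r c = r ++ [c] := by
        simp [PySem.Set.add, PySem.Set.contains, hmem]
      have hupd : PySem.Set.update r (c :: cs) = PySem.Set.update (r ++ [c]) cs := by
        show PySem.Set.update (PySem.Set.add r c) cs = _
        rw [hadd]
      obtain ⟨t, ht⟩ : ∃ t, PySem.Set.update (r ++ [c]) cs = (r ++ [c]) ++ t :=
        ⟨_, PySem.Set.update_eq_append_filter _ _⟩
      have hflag : decide (PySem.Set.update (r ++ [c]) cs ≠ r) = true := by
        rw [ht]
        simp only [decide_eq_true_eq]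
        intro h
        have := congrArg List.length h
        simp at this
      simp only [List.foldl_cons, hcf, Bool.false_eq_true, if_false, ih, hupd, hflag]
      simp

theorem bRound_prefix (rules : List (String × List String)) (snapshot : List String) :
    ∀ reached : List String, ∃ t, bRound rules snapshot reached = reached ++ t := by
  induction snapshot with
  | nil => intro r; exact ⟨[], by simp [bRound]⟩
  | cons c cs ih =>
    intro r
    obtain ⟨t, ht⟩ := ih (PySem.Set.update r (PySem.Dict.getD (PySem.Dict.mk rules) c []))
    refine ⟨(PySem.Set.ofList (PySem.Dict.getD (PySem.Dict.mk rules) c [])).filter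
      (fun x => !(PySem.Set.contains r x)) ++ t, ?_⟩
    rw [bRound, List.foldl_cons]
    show bRound rules cs _ = _
    rw [ht, PySem.Set.update_eq_append_filter, List.append_assoc]

theorem bSweep_eq (rules : List (String × List String)) (snapshot : List String) :
    ∀ (r : List String) (a : Bool),
    bSweep rules snapshot (r, a)
      = (bRound rules snapshot r, a || decide (bRound rules snapshot r ≠ r)) := by
  induction snapshot with
  | nil => intro r a; simp [bSweep, bRound]
  | cons c cs ih =>
    intro r a
    have step : bSweep rules (c :: cs) (r, a)
        = bSweep rules cs
          (if PySem.Dict.contains (PySem.Dict.mk rules) c then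
            (PySem.Dict.getD (PySem.Dict.mk rules) c []).foldl
              (fun st child => if st.1.contains child then st else (st.1 ++ [child], true)) (r, a)
          else (r, a)) := rfl
    have hroundstep : bRound rules (c :: cs) r
        = bRound rules cs (PySem.Set.update r (PySem.Dict.getD (PySem.Dict.mk rules) c [])) := rfl
    by_cases hc : PySem.Dict.contains (PySem.Dict.mk rules) c = true
    · rw [step, if_pos hc, bInner_eq, ih, hroundstep]
      set r1 := PySem.Set.update r (PySem.Dict.getD (PySem.Dict.mk rules) c []) with hr1
      obtain ⟨s, hs⟩ : ∃ s, r1 = r ++ s := ⟨_, PySem.Set.update_eq_append_filter _ _⟩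
      obtain ⟨t, ht⟩ := bRound_prefix rules cs r1
      congr 1
      rw [ht, hs]
      rcases s with _ | ⟨y, s⟩
      · simp
      · have h1 : decide (r ++ (y :: s) ≠ r) = true := by
          simp only [decide_eq_true_eq]
          intro h
          have := congrArg List.length h
          simp at this
        have h2 : decide (r ++ (y :: s) ++ t ≠ r) = true := by
          simp only [decide_eq_true_eq]
          intro h
          have := congrArg List.length h
          simp at this
        rw [h1, h2]
        simp
    · have hcf : PySem.Dict.contains (PySem.Dict.mk rules) c = false := eq_false_of_ne_true hc
      have hgD : PySem.Dict.getD (PySem.Dict.mk rules) c [] = [] :=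
        PySem.Dict.getD_of_not_contains _ _ hcf
      have hupd : PySem.Set.update r (PySem.Dict.getD (PySem.Dict.mk rules) c []) = r := by
        rw [hgD]; rfl
      rw [step, if_neg hc, ih, hroundstep, hupd]

theorem bRound_flat (rules : List (String × List String)) (snapshot : List String) :
    ∀ reached : List String,
    bRound rules snapshot reached
      = PySem.Set.update reached
          (snapshot.flatMap (fun c => PySem.Dict.getD (PySem.Dict.mk rules) c [])) := by
  induction snapshot with
  | nil => intro r; simp [bRound, PySem.Set.update]
  | cons c cs ih =>
    intro r
    rw [bRound, List.foldl_cons]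
    show bRound rules cs _ = _
    rw [ih, List.flatMap_cons]
    simp [PySem.Set.update, List.foldl_append]

theorem bChild_mem_succs {rules : List (String × List String)} {c x : String}
    (hx : x ∈ PySem.Dict.getD (PySem.Dict.mk rules) c []) : x ∈ rules.flatMap Prod.snd := by
  unfold PySem.Dict.getD PySem.Dict.get? at hx
  cases hf : List.find? (fun p => p.1 == c) (PySem.Dict.items (PySem.Dict.mk rules)) with
  | none => simp [hf] at hx
  | some p =>
    simp only [hf, Option.map_some, Option.getD_some] at hx
    exact List.mem_flatMap.mpr ⟨p, List.mem_of_find?_eq_some hf, hx⟩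

theorem bPending_lt {rules : List (String × List String)} {r r' : List String} {x : String}
    (hx : x ∈ rules.flatMap Prod.snd) (hxr : x ∉ r)
    (hsub : ∀ y ∈ r, y ∈ r') (hx' : x ∈ r') :
    bPending rules r' < bPending rules r := by
  unfold bPending
  rw [List.countP_eq_length_filter, List.countP_eq_length_filter]
  have key : ((rules.flatMap Prod.snd).filter (fun s => !r'.contains s))
      = (((rules.flatMap Prod.snd).filter (fun s => !r.contains s)).filter (fun s => !r'.contains s)) := by
    rw [List.filter_filter]
    apply List.filter_congr
    intro y _
    by_cases h' : y ∈ r'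
    · simp [h']
    · have hyr : y ∉ r := fun hc => h' (hsub y hc)
      simp [h', hyr]
  rw [key]
  refine List.length_filter_lt_length_iff_exists.mpr ⟨x, ?_, by simp [hx']⟩
  simp [List.mem_filter, hx, hxr]

-- reached = []; for c in rules[color]: if c not in reached: append  — then the while-True loop
def bFix (rules : List (String × List String)) (reached : List String) : List String :=
  let st := bSweep rules reached (reached, false)
  if st.2 then bFix rules st.1
  else PySem.Set.ofList st.1
termination_by bPending rules reached
decreasing_by
  rename_i hflag
  have hflag' : (bSweep rules reached (reached, false)).2 = true := hflag
  rw [bSweep_eq] at hflag'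
  rw [bSweep_eq]
  simp only [Bool.false_or, decide_eq_true_eq] at hflag'
  rw [bRound_flat] at hflag'
  rw [bRound_flat]
  set flat := reached.flatMap (fun c => PySem.Dict.getD (PySem.Dict.mk rules) c [])
  have happ := PySem.Set.update_eq_append_filter reached flat
  have hne : (PySem.Set.ofList flat).filter (fun x => !(PySem.Set.contains reached x)) ≠ [] := by
    intro h
    exact hflag' (by rw [happ, h, List.append_nil])
  obtain ⟨x, hx⟩ := List.exists_mem_of_ne_nil _ hne
  have hx' := List.mem_filter.mp hx
  have hxf : x ∈ flat := (PySem.Set.mem_ofList _ _).mp hx'.1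
  have hxr : x ∉ reached := by
    intro hc
    simp [PySem.Set.contains, hc] at hx'
  obtain ⟨c, _, hxc⟩ := List.mem_flatMap.mp hxf
  exact bPending_lt (bChild_mem_succs hxc) hxr
    (fun y hy => by rw [happ]; exact List.mem_append.mpr (Or.inl hy))
    (by rw [happ]; exact List.mem_append.mpr (Or.inr hx))

def outer_colors_alt (rules : List (String × List String)) (color : String) : List String :=
  match PySem.Dict.get? (PySem.Dict.mk rules) color with
  | some cs =>
    bFix rules (cs.foldl (fun reached c => if reached.contains c then reached else reached ++ [c]) [])
  | none => []   -- Python raises KeyError here; excluded by Pre_outer_colors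

-- ===== PRECONDITION & SPEC =====
-- Pre_ excludes exactly the inputs where Python A raises KeyError: color not a key of rules
-- (B raises the same KeyError there).
def Pre_outer_colors (rules : List (String × List String)) (color : String) : Prop :=
  color ∈ rules.map Prod.fst
instance (rules : List (String × List String)) (color : String) : Decidable (Pre_outer_colors rules color) := by unfold Pre_outer_colors; infer_instance

def pvWitness_outer_colors : (List (String × List String)) × String :=
  ([("shiny gold", ["muted yellow", "bright white"]), ("bright white", ["shiny gold"])], "shiny gold")

def Spec_outer_colors (rules : List (String × List String)) (color : String) (out : List String) : Prop := out = outer_colors_alt rules color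
instance (rules : List (String × List String)) (color : String) (out : List String) : Decidable (Spec_outer_colors rules color out) := by unfold Spec_outer_colors; infer_instance

-- ===== CLAIM (what is proved, stated in full; the proofs are below) =====
def Claim_equal_outer_colors : Prop := ∀ (rules : List (String × List String)) (color : String), Dom_outer_colors rules color → Pre_outer_colors rules color → Spec_outer_colors rules color (outer_colors rules color)

-- ===== LEMMAS AND PROOFS =====
-- Proof plan: both loops are reduced to one reference breadth-first computation dLoop/lvl
-- (A by splitting its queue into frontier+next, B via bSweep_eq/bRound_flat and a set-level
-- fixpoint fLoop), so everything below is proof-only infrastructure.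

-- A's queue, split as current frontier f followed by the not-yet-started colors n
def dLoop (rules : List (String × List String)) (f n colors : List String) : List String :=
  match f with
  | [] => if n = [] then colors else dLoop rules n [] colors
  | a :: f' =>
    dLoop rules f'
      (n ++ PySem.Set.diff (PySem.Set.ofList (PySem.Dict.getD (PySem.Dict.mk rules) a [])) colors)
      (colors ++ PySem.Set.diff (PySem.Set.ofList (PySem.Dict.getD (PySem.Dict.mk rules) a [])) colors)
termination_by (pvGap rules colors, n.length + f.length, if f = [] then 1 else 0)
decreasing_by
  · rename_i hne
    simp [Prod.lex_def, hne]
  · by_cases hd : PySem.Set.diff (PySem.Set.ofList (PySem.Dict.getD (PySem.Dict.mk rules) a [])) colors = []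
    · simp [Prod.lex_def, hd]
    · obtain ⟨x, hx⟩ := List.exists_mem_of_ne_nil _ hd
      have hx' := List.mem_filter.mp hx
      have hxn : x ∈ PySem.Dict.getD (PySem.Dict.mk rules) a [] := (PySem.Set.mem_ofList _ _).mp hx'.1
      have hxc : x ∉ colors := by
        intro hc
        simp [hc] at hx'
      exact Prod.Lex.left _ _ (pvGap_lt (mem_pvUniv_of_getD hxn) hxc
        (fun y hy => List.mem_append.mpr (Or.inl hy))
        (List.mem_append.mpr (Or.inr hx)))

-- the new colors of one whole round, discovered from frontier f, in discovery order
def fNew (rules : List (String × List String)) (colors : PySem.Set String) : PySem.Set String :=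
  PySem.Set.diff
    (PySem.Set.ofList (colors.flatMap (fun c => PySem.Dict.getD (PySem.Dict.mk rules) c [])))
    colors

-- set-level fixpoint: union in one whole round until nothing new appears
def fLoop (rules : List (String × List String)) (colors : PySem.Set String) : PySem.Set String :=
  if fNew rules colors = [] then colors
  else fLoop rules (PySem.Set.union colors (fNew rules colors))
termination_by pvGap rules colors
decreasing_by
  rename_i hne
  obtain ⟨x, hx⟩ := List.exists_mem_of_ne_nil _ hne
  have hx' := List.mem_filter.mp hx
  have hxm : x ∈ colors.flatMap (fun c => PySem.Dict.getD (PySem.Dict.mk rules) c []) :=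
    (PySem.Set.mem_ofList _ _).mp hx'.1
  obtain ⟨c, _, hxc⟩ := List.mem_flatMap.mp hxm
  have hxcol : x ∉ colors := by
    intro hc
    simp [hc] at hx'
  exact pvGap_lt (mem_pvUniv_of_getD hxc) hxcol
    (fun y hy => (PySem.Set.mem_union _ _ _).mpr (Or.inl hy))
    ((PySem.Set.mem_union _ _ _).mpr (Or.inr hx))

-- one whole round: the new colors discovered from frontier f, in discovery order
def lvl (rules : List (String × List String)) (f colors : List String) : List String :=
  match f with
  | [] => []
  | a :: f' =>
    PySem.Set.diff (PySem.Set.ofList (PySem.Dict.getD (PySem.Dict.mk rules) a [])) colors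
      ++ lvl rules f'
          (colors ++ PySem.Set.diff (PySem.Set.ofList (PySem.Dict.getD (PySem.Dict.mk rules) a [])) colors)

theorem diff_ofList_append (X Y C : List String) :
    PySem.Set.diff (PySem.Set.ofList (X ++ Y)) C
      = PySem.Set.diff (PySem.Set.ofList X) C
        ++ PySem.Set.diff (PySem.Set.ofList Y) (C ++ PySem.Set.diff (PySem.Set.ofList X) C) := by
  show (PySem.Set.ofList (X ++ Y)).filter _ = _
  rw [PySem.Set.ofList_append, PySem.Set.update_eq_append_filter, List.filter_append]
  congr 1
  rw [List.filter_filter]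
  apply List.filter_congr
  intro y _
  by_cases hC : y ∈ C <;> by_cases hX : y ∈ PySem.Set.ofList X <;>
    simp [PySem.Set.diff, PySem.Set.contains, List.mem_filter, hC, hX]

theorem diff_ofList_append_of_sub {X : List String} (Y C : List String) (h : ∀ x ∈ X, x ∈ C) :
    PySem.Set.diff (PySem.Set.ofList (X ++ Y)) C = PySem.Set.diff (PySem.Set.ofList Y) C := by
  have hX : PySem.Set.diff (PySem.Set.ofList X) C = [] := by
    apply List.filter_eq_nil_iff.mpr
    intro y hy
    have : y ∈ C := h y ((PySem.Set.mem_ofList _ _).mp hy)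
    simp [PySem.Set.contains, this]
  rw [diff_ofList_append, hX, List.append_nil, List.nil_append]

theorem union_eq_append_diff (s : PySem.Set String) (next : List String) :
    PySem.Set.union s next = s ++ PySem.Set.diff (PySem.Set.ofList next) s := by
  show PySem.Set.update s next = _
  rw [PySem.Set.update_eq_append_filter]
  rfl

theorem nodup_of_diff_ofList (next C : List String) :
    (PySem.Set.diff (PySem.Set.ofList next) C).Nodup :=
  (PySem.Set.nodup_ofList next).filter _

theorem not_mem_of_mem_diff {x : String} {next C : List String}
    (hx : x ∈ PySem.Set.diff (PySem.Set.ofList next) C) : x ∉ C := by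
  have := (List.mem_filter.mp hx).2
  intro hc
  simp [PySem.Set.contains, hc] at this

theorem union_eq_append_of_nodup_disjoint (s : PySem.Set String) {e : List String}
    (hn : e.Nodup) (hd : ∀ x ∈ e, x ∉ s) :
    PySem.Set.union s e = s ++ e := by
  show PySem.Set.update s _ = _
  exact PySem.Set.update_eq_append_of_disjoint s e hn hd

theorem aLoop_eq_dLoop (rules : List (String × List String)) :
    ∀ (f n colors : List String), (∀ x ∈ f ++ n, x ∈ colors) →
    aLoop rules (f ++ n) colors = dLoop rules f n colors := by
  intro f n colors
  induction f, n, colors using dLoop.induct rules with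
  | case1 colors =>
    intro _
    rw [List.nil_append, aLoop, dLoop]
    simp
  | case2 n colors hne ih =>
    intro h
    rw [dLoop, if_neg hne, ← ih (by simpa using h)]
    simp
  | case3 n colors a f' ih =>
    intro h
    by_cases hcont : PySem.Dict.contains (PySem.Dict.mk rules) a = true
    · rw [List.cons_append, aLoop, if_pos hcont]
      conv_rhs => rw [dLoop]
      have hdisj : ∀ x ∈ PySem.Set.diff
          (PySem.Set.ofList (PySem.Dict.getD (PySem.Dict.mk rules) a [])) colors, x ∉ f' ++ n := by
        intro x hx hmem
        exact not_mem_of_mem_diff hx (h x (by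
          rcases List.mem_append.mp hmem with h1 | h2
          · exact List.mem_append.mpr (Or.inl (List.mem_cons_of_mem a h1))
          · exact List.mem_append.mpr (Or.inr h2)))
      rw [union_eq_append_of_nodup_disjoint _ (nodup_of_diff_ofList _ colors) hdisj,
        union_eq_append_diff colors (PySem.Dict.getD (PySem.Dict.mk rules) a []), List.append_assoc]
      apply ih
      intro x hx
      rcases List.mem_append.mp hx with h1 | h2
      · exact List.mem_append.mpr (Or.inl (h x (List.mem_append.mpr
          (Or.inl (List.mem_cons_of_mem a h1)))))
      · rcases List.mem_append.mp h2 with h3 | h4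
        · exact List.mem_append.mpr (Or.inl (h x (List.mem_append.mpr (Or.inr h3))))
        · exact List.mem_append.mpr (Or.inr h4)
    · have hfalse : PySem.Dict.contains (PySem.Dict.mk rules) a = false := by
        cases hcc : PySem.Dict.contains (PySem.Dict.mk rules) a
        · rfl
        · exact absurd hcc hcont
      have hgD : PySem.Dict.getD (PySem.Dict.mk rules) a [] = [] :=
        PySem.Dict.getD_of_not_contains _ _ hfalse
      rw [hgD] at ih
      rw [List.cons_append, aLoop, if_neg hcont]
      conv_rhs => rw [dLoop]
      rw [hgD]
      simp only [PySem.Set.ofList, PySem.Set.diff, PySem.Set.empty, List.foldl_nil,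
        List.filter_nil, List.append_nil] at ih ⊢
      apply ih
      intro x hx
      apply h
      rcases List.mem_append.mp hx with h1 | h2
      · exact List.mem_append.mpr (Or.inl (List.mem_cons_of_mem a h1))
      · exact List.mem_append.mpr (Or.inr h2)

theorem dLoop_lvl (rules : List (String × List String)) (f : List String) :
    ∀ n colors, dLoop rules f n colors
      = dLoop rules [] (n ++ lvl rules f colors) (colors ++ lvl rules f colors) := by
  induction f with
  | nil => intro n colors; simp [lvl]
  | cons a f' ih =>
    intro n colors
    conv_lhs => rw [dLoop]
    rw [ih]
    conv_rhs => rw [lvl]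
    simp [List.append_assoc]

theorem lvl_eq_diff (rules : List (String × List String)) (f : List String) :
    ∀ colors, lvl rules f colors
      = PySem.Set.diff
          (PySem.Set.ofList (f.flatMap (fun c => PySem.Dict.getD (PySem.Dict.mk rules) c [])))
          colors := by
  induction f with
  | nil =>
    intro colors
    simp [lvl, PySem.Set.diff, PySem.Set.ofList]
  | cons a f' ih =>
    intro colors
    rw [lvl, List.flatMap_cons, diff_ofList_append, ih]

theorem fLoop_eq_dLoop (rules : List (String × List String)) :
    ∀ (colors P f : List String), colors = P ++ f →
    (∀ x ∈ P, ∀ y ∈ PySem.Dict.getD (PySem.Dict.mk rules) x [], y ∈ colors) →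
    fLoop rules colors = dLoop rules f [] colors := by
  have hnew_eq : ∀ (colors P f : List String), colors = P ++ f →
      (∀ x ∈ P, ∀ y ∈ PySem.Dict.getD (PySem.Dict.mk rules) x [], y ∈ colors) →
      fNew rules colors = lvl rules f colors := by
    intro colors P f hc hcl
    have hflat : colors.flatMap (fun c => PySem.Dict.getD (PySem.Dict.mk rules) c [])
        = P.flatMap (fun c => PySem.Dict.getD (PySem.Dict.mk rules) c [])
          ++ f.flatMap (fun c => PySem.Dict.getD (PySem.Dict.mk rules) c []) := by
      rw [hc, List.flatMap_append]
    have hsubP : ∀ x ∈ P.flatMap (fun c => PySem.Dict.getD (PySem.Dict.mk rules) c []), x ∈ colors := by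
      intro x hx
      obtain ⟨c, hcP, hxc⟩ := List.mem_flatMap.mp hx
      exact hcl c hcP x hxc
    unfold fNew
    rw [hflat, diff_ofList_append_of_sub _ _ hsubP, ← lvl_eq_diff]
  intro colors
  induction colors using fLoop.induct rules with
  | case1 colors hemp =>
    intro P f hc hcl
    have hnew := hnew_eq colors P f hc hcl
    rw [fLoop, if_pos hemp, dLoop_lvl, ← hnew, hemp]
    rw [dLoop]
    simp
  | case2 colors hne ih =>
    intro P f hc hcl
    have hnew := hnew_eq colors P f hc hcl
    have hunion : PySem.Set.union colors (fNew rules colors) = colors ++ lvl rules f colors := by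
      rw [hnew]
      apply union_eq_append_of_nodup_disjoint
      · rw [lvl_eq_diff]; exact nodup_of_diff_ofList _ _
      · intro x hx
        rw [lvl_eq_diff] at hx
        exact not_mem_of_mem_diff hx
    have he : ¬ lvl rules f colors = [] := by rw [← hnew]; exact hne
    have hcl' : ∀ x ∈ colors, ∀ y ∈ PySem.Dict.getD (PySem.Dict.mk rules) x [],
        y ∈ PySem.Set.union colors (fNew rules colors) := by
      intro x hx y hy
      rw [hunion]
      rw [hc] at hx
      rcases List.mem_append.mp hx with hP | hf
      · exact List.mem_append.mpr (Or.inl (hcl x hP y hy))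
      · by_cases hyc : y ∈ colors
        · exact List.mem_append.mpr (Or.inl hyc)
        · refine List.mem_append.mpr (Or.inr ?_)
          rw [lvl_eq_diff]
          refine List.mem_filter.mpr ⟨?_, ?_⟩
          · exact (PySem.Set.mem_ofList _ _).mpr (List.mem_flatMap.mpr ⟨x, hf, hy⟩)
          · simp [PySem.Set.contains, hyc]
    have hrec := ih colors (lvl rules f colors) hunion hcl'
    rw [fLoop, if_neg hne, hrec, hunion]
    rw [dLoop_lvl rules f [] colors, List.nil_append]
    rw [dLoop, if_neg he]

-- bridge: the update of one sweep equals colors ++ fNew (set-level round)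
theorem update_flat_eq_append_fNew (rules : List (String × List String)) (r : List String) :
    PySem.Set.update r (r.flatMap (fun c => PySem.Dict.getD (PySem.Dict.mk rules) c []))
      = r ++ fNew rules r := by
  rw [PySem.Set.update_eq_append_filter]
  rfl

-- bridge: B's fixpoint equals the set-level fixpoint on a duplicate-free start
theorem bFix_eq_fLoop (rules : List (String × List String)) :
    ∀ colors : List String, colors.Nodup → bFix rules colors = fLoop rules colors := by
  intro colors
  induction colors using fLoop.induct rules with
  | case1 colors hemp =>
    intro hnd
    have hupd : PySem.Set.update colors
        (colors.flatMap (fun c => PySem.Dict.getD (PySem.Dict.mk rules) c [])) = colors := by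
      rw [update_flat_eq_append_fNew, hemp, List.append_nil]
    rw [bFix.eq_def]
    simp only [bSweep_eq, bRound_flat, hupd, Bool.false_or, ne_eq, not_true_eq_false,
      decide_eq_true_eq]
    rw [fLoop, if_pos hemp]
    exact PySem.Set.ofList_eq_self_of_nodup _ hnd
  | case2 colors hne ih =>
    intro hnd
    have hupd : PySem.Set.update colors
        (colors.flatMap (fun c => PySem.Dict.getD (PySem.Dict.mk rules) c []))
        = colors ++ fNew rules colors := update_flat_eq_append_fNew rules colors
    have hflag : decide ((colors ++ fNew rules colors) ≠ colors) = true := by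
      simp only [decide_eq_true_eq]
      intro h
      exact hne (by simpa using congrArg List.length h)
    have hnd' : (colors ++ fNew rules colors).Nodup := by
      refine List.Nodup.append hnd (nodup_of_diff_ofList _ _) ?_
      intro x hx1 hx2
      exact not_mem_of_mem_diff hx2 hx1
    have hu : PySem.Set.union colors (fNew rules colors) = colors ++ fNew rules colors := by
      apply union_eq_append_of_nodup_disjoint
      · exact nodup_of_diff_ofList _ _
      · intro x hx
        exact not_mem_of_mem_diff hx
    rw [bFix.eq_def]
    simp only [bSweep_eq, bRound_flat, hupd, Bool.false_or, hflag, if_true]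
    rw [fLoop, if_neg hne, hu]
    exact hu ▸ ih (by rw [hu]; exact hnd')

-- bridge: B's seed loop is set(rules[color])
theorem bSeed_eq (init : List String) :
    init.foldl (fun reached c => if reached.contains c then reached else reached ++ [c]) []
      = PySem.Set.ofList init := by
  have h : ∀ (cs r : List String),
      cs.foldl (fun reached c => if reached.contains c then reached else reached ++ [c]) r
        = PySem.Set.update r cs := by
    intro cs
    induction cs with
    | nil => intro r; simp [PySem.Set.update]
    | cons c cs ih =>
      intro r
      rw [List.foldl_cons]
      have hif : (if r.contains c then r else r ++ [c]) = PySem.Set.add r c := by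
        simp [PySem.Set.add, PySem.Set.contains]
      rw [hif]
      exact ih (PySem.Set.add r c)
  rw [h]
  rfl

-- ===== VERDICT (by name: the statement is the Claim_ definition above) =====
theorem outer_colors_spec : Claim_equal_outer_colors := by
  intro rules color _ _
  unfold Spec_outer_colors outer_colors outer_colors_alt
  cases hg : PySem.Dict.get? (PySem.Dict.mk rules) color with
  | none => rfl
  | some init =>
    have ha := aLoop_eq_dLoop rules (PySem.Set.ofList init) [] (PySem.Set.ofList init)
      (by intro x hx; simpa using hx)
    have hf := fLoop_eq_dLoop rules (PySem.Set.ofList init) [] (PySem.Set.ofList init) rfl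
      (by intro x hx; simp at hx)
    simp only [List.append_nil] at ha
    dsimp only
    rw [bSeed_eq, bFix_eq_fLoop rules _ (PySem.Set.nodup_ofList init), ha, hf]
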